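-- pv_equiv track=rewrite | github.com/SuperagenticAI/rlm-code | rlm_code/validation/predictor_validator.py | suggest_predictor
-- ===== SOURCE A (Python) =====
-- def suggest_predictor(task_description: str) -> str:
--     """
--     Suggest best predictor for a task.
--
--     Args:
--         task_description: Description of the task
--
--     Returns:
--         Suggested predictor name
--     """
--     task_lower = task_description.lower()
--
--     # Simple keyword-based suggestions
--     if any(word in task_lower for word in ["tool", "api", "action", "search"]):
--         return "ReAct"
--     elif any(word in task_lower for word in ["math", "calculate", "compute"]):
--         return "ProgramOfThought"
--     elif any(word in task_lower for word in ["code", "program", "implement"]):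
--         return "CodeAct"
--     elif any(word in task_lower for word in ["reason", "explain", "analyze", "complex"]):
--         return "ChainOfThought"
--     elif any(word in task_lower for word in ["refine", "improve", "polish"]):
--         return "Refine"
--     elif any(word in task_lower for word in ["ensemble", "multiple", "combine"]):
--         return "Parallel"
--     else:
--         # Default to ChainOfThought for most tasks
--         return "ChainOfThought"
-- ===== SOURCE B (Python) =====
-- # Two-stage approach: first collect ALL matched predictor names from a flat
-- # keyword->name map, then select the highest-priority matched name.
-- _KEYWORD_TO_PREDICTOR = [
--     ("tool", "ReAct"), ("api", "ReAct"), ("action", "ReAct"), ("search", "ReAct"),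
--     ("math", "ProgramOfThought"), ("calculate", "ProgramOfThought"), ("compute", "ProgramOfThought"),
--     ("code", "CodeAct"), ("program", "CodeAct"), ("implement", "CodeAct"),
--     ("reason", "ChainOfThought"), ("explain", "ChainOfThought"), ("analyze", "ChainOfThought"), ("complex", "ChainOfThought"),
--     ("refine", "Refine"), ("improve", "Refine"), ("polish", "Refine"),
--     ("ensemble", "Parallel"), ("multiple", "Parallel"), ("combine", "Parallel"),
-- ]
--
-- _PRIORITY = ["ReAct", "ProgramOfThought", "CodeAct", "ChainOfThought", "Refine", "Parallel"]
--
--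
-- def suggest_predictor(task_description: str) -> str:
--     task_lower = task_description.lower()
--     # Stage 1: all predictors with at least one keyword present.
--     matched = [name for kw, name in _KEYWORD_TO_PREDICTOR if kw in task_lower]
--     # Stage 2: highest-priority matched predictor, defaulting to ChainOfThought.
--     return next((name for name in _PRIORITY if name in matched), "ChainOfThought")
-- ===== Notes on version B (the rewrite author's own statement) =====
-- stated objective: alternative
-- what changed: Replaces the short-circuiting if/elif keyword chain with two staged passes: first collect ALL matched predictor names from a flat keyword-to-name map, then select the highest-priority matched name from a priority list (default ChainOfThought).
import Mathlib
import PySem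

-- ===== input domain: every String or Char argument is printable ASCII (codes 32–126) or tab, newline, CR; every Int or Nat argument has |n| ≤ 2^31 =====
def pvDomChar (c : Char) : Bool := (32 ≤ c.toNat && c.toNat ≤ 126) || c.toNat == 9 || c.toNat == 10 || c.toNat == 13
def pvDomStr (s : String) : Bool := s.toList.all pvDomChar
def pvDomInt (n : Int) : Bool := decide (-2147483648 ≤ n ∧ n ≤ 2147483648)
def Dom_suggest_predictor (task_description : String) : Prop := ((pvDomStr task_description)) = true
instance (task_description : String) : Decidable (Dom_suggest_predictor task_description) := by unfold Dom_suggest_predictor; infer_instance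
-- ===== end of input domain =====

-- B computes all matched predictors from a flat keyword→name map first, then picks the
-- highest-priority match; same outputs as A's short-circuiting if/elif chain.
-- ===== PORT A =====
def suggest_predictor (task_description : String) : String :=
  let task_lower := PySem.Str.lower task_description
  if ["tool", "api", "action", "search"].any (fun word => PySem.Str.isIn word task_lower) then
    "ReAct"
  else if ["math", "calculate", "compute"].any (fun word => PySem.Str.isIn word task_lower) then
    "ProgramOfThought"
  else if ["code", "program", "implement"].any (fun word => PySem.Str.isIn word task_lower) then
    "CodeAct"
  else if ["reason", "explain", "analyze", "complex"].any (fun word => PySem.Str.isIn word task_lower) then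
    "ChainOfThought"
  else if ["refine", "improve", "polish"].any (fun word => PySem.Str.isIn word task_lower) then
    "Refine"
  else if ["ensemble", "multiple", "combine"].any (fun word => PySem.Str.isIn word task_lower) then
    "Parallel"
  else
    "ChainOfThought"

-- ===== PORT B =====
def keywordToPredictor : List (String × String) :=
  [("tool", "ReAct"), ("api", "ReAct"), ("action", "ReAct"), ("search", "ReAct"),
   ("math", "ProgramOfThought"), ("calculate", "ProgramOfThought"), ("compute", "ProgramOfThought"),
   ("code", "CodeAct"), ("program", "CodeAct"), ("implement", "CodeAct"),
   ("reason", "ChainOfThought"), ("explain", "ChainOfThought"), ("analyze", "ChainOfThought"), ("complex", "ChainOfThought"),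
   ("refine", "Refine"), ("improve", "Refine"), ("polish", "Refine"),
   ("ensemble", "Parallel"), ("multiple", "Parallel"), ("combine", "Parallel")]

def predictorPriority : List String :=
  ["ReAct", "ProgramOfThought", "CodeAct", "ChainOfThought", "Refine", "Parallel"]

-- next((name for name in _PRIORITY if name in matched), "ChainOfThought")
def firstMatched (matched : List String) : List String → String
  | [] => "ChainOfThought"
  | name :: rest => if matched.contains name then name else firstMatched matched rest

def suggest_predictor_alt (task_description : String) : String :=
  let task_lower := PySem.Str.lower task_description
  let matched := (keywordToPredictor.filter (fun p => PySem.Str.isIn p.1 task_lower)).map Prod.snd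
  firstMatched matched predictorPriority

-- ===== PRECONDITION & SPEC =====
def Spec_suggest_predictor (task_description : String) (out : String) : Prop := out = suggest_predictor_alt task_description
instance (task_description : String) (out : String) : Decidable (Spec_suggest_predictor task_description out) := by unfold Spec_suggest_predictor; infer_instance

-- ===== CLAIM (what is proved, stated in full; the proofs are below) =====
def Claim_equal_suggest_predictor : Prop := ∀ (task_description : String), Dom_suggest_predictor task_description → Spec_suggest_predictor task_description (suggest_predictor task_description)

-- ===== LEMMAS AND PROOFS =====
theorem mem_map_filter (l : List (String × String)) (f : String × String → Bool) (n : String) :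
    (n ∈ (l.filter f).map Prod.snd) ↔ (l.any fun p => f p && n == p.2) = true := by
  simp only [List.mem_map, List.mem_filter, List.any_eq_true, Bool.and_eq_true, beq_iff_eq]
  aesop

-- ===== VERDICT (by name: the statement is the Claim_ definition above) =====
theorem suggest_predictor_spec : Claim_equal_suggest_predictor := by
  intro td _
  unfold Spec_suggest_predictor suggest_predictor suggest_predictor_alt
  simp [firstMatched, mem_map_filter, keywordToPredictor, predictorPriority,
    List.any_cons, List.any_nil]
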